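-- pv_equiv track=rewrite | github.com/unknhawk/aoc-2022 | aoc-15/mdm.py | coverageAtYset
-- ===== SOURCE A (Python) =====
-- def Manhattan(A,B):
--     return abs(A[0]-B[0])+abs(A[1]-B[1])
--
-- def coverageAtYset(data,Y=10):
--     coverage = set()
--     for m in data:
--         S = (m[0],m[1])
--         B = (m[2],m[3])
--         d = Manhattan(S,B)
--         dy = abs(Y-S[1])
--         if dy<=d: # Y intercept the sensor area
--             xmin = S[0]-(d-dy)
--             xmax = S[0]+(d-dy)
--             for x in range(xmin,xmax+1):
--                 coverage.add(x)
--     return coverage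
-- ===== SOURCE B (Python) =====
-- def _sub(s, a, b):
--     # subtract the interval [a, b] from the interval s = [c, d];
--     # returns the 0, 1 or 2 remaining pieces, in ascending order
--     c, d = s
--     res = []
--     if c < a:
--         res.append((c, min(d, a - 1)))
--     if b < d:
--         res.append((max(c, b + 1), d))
--     return res
--
-- def coverageAtYset(data, Y=10):
--     # interval covered on row Y by each sensor
--     ivs = []
--     for x1, y1, x2, y2 in data:
--         r = abs(x1 - x2) + abs(y1 - y2) - abs(Y - y1)
--         if r >= 0:
--             ivs.append((x1 - r, x1 + r))
--     # each sensor contributes its interval MINUS the intervals already seen: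
--     # only the genuinely new x's are ever enumerated
--     out = []
--     prev = []
--     for lo, hi in ivs:
--         segs = [(lo, hi)]
--         for a, b in prev:
--             segs = [p for s in segs for p in _sub(s, a, b)]
--         for a2, b2 in segs:
--             out.extend(range(a2, b2 + 1))
--         prev.append((lo, hi))
--     return set(out)
-- ===== Notes on version B (the rewrite author's own statement) =====
-- stated objective: alternative
-- what changed: A grows a set by enumerating every x of every sensor's row interval; B first collects the per-sensor intervals and then, per sensor, subtracts the earlier intervals so that only the genuinely new x's are ever enumerated.
import Mathlib
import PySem

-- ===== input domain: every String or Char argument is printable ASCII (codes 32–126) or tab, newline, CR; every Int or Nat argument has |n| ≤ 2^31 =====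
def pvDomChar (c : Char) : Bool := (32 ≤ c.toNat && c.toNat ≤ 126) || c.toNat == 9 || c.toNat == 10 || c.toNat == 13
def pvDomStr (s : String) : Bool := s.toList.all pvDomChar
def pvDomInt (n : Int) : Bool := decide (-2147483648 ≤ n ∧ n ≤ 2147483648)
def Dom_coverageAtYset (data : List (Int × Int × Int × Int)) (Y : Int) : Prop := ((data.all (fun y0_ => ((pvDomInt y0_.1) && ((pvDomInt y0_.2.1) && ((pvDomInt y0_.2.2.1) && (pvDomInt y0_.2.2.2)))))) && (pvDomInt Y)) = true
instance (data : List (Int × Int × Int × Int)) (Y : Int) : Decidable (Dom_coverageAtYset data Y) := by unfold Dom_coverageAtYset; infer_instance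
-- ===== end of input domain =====

-- B replaces A's per-sensor enumeration of every covered x into a growing set by interval
-- subtraction: each sensor's row-Y interval minus the earlier sensors' intervals, so only
-- genuinely new x's are ever enumerated (objective: alternative algorithm).

-- ===== PORT A =====
def pvManhattan (A B : Int × Int) : Int := |A.1 - B.1| + |A.2 - B.2|

def coverageAtYset (data : List (Int × Int × Int × Int)) (Y : Int) : List Int :=
  data.foldl (fun coverage m =>
    let S : Int × Int := (m.1, m.2.1)
    let B : Int × Int := (m.2.2.1, m.2.2.2)
    let d := pvManhattan S B
    let dy := |Y - S.2|
    if dy ≤ d then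
      let xmin := S.1 - (d - dy)
      let xmax := S.1 + (d - dy)
      (PySem.List.pyRange xmin (xmax + 1) 1).foldl (fun cov x => PySem.Set.add cov x) coverage
    else coverage) PySem.Set.empty

-- ===== PORT B =====
-- Source B's _sub: the pieces of the interval s = [c, d] left after removing [a, b]
def pvSub (s : Int × Int) (a b : Int) : List (Int × Int) :=
  (if s.1 < a then [(s.1, min s.2 (a - 1))] else []) ++
  (if b < s.2 then [(max s.1 (b + 1), s.2)] else [])

def coverageAtYset_alt (data : List (Int × Int × Int × Int)) (Y : Int) : List Int :=
  let ivs := data.foldl (fun acc m =>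
      let r := |m.1 - m.2.2.1| + |m.2.1 - m.2.2.2| - |Y - m.2.1|
      if 0 ≤ r then acc ++ [(m.1 - r, m.1 + r)] else acc) []
  let st := ivs.foldl (fun (st : List Int × List (Int × Int)) p =>
      let segs := st.2.foldl (fun segs ab => segs.flatMap (fun s => pvSub s ab.1 ab.2)) [p]
      (st.1 ++ segs.flatMap (fun s => PySem.List.pyRange s.1 (s.2 + 1) 1), st.2 ++ [p])) ([], [])
  PySem.Set.ofList st.1

-- ===== PRECONDITION & SPEC =====
def Spec_coverageAtYset (data : List (Int × Int × Int × Int)) (Y : Int) (out : List Int) : Prop := out = coverageAtYset_alt data Y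
instance (data : List (Int × Int × Int × Int)) (Y : Int) (out : List Int) : Decidable (Spec_coverageAtYset data Y out) := by unfold Spec_coverageAtYset; infer_instance

-- ===== CLAIM (what is proved, stated in full; the proofs are below) =====
def Claim_equal_coverageAtYset : Prop := ∀ (data : List (Int × Int × Int × Int)) (Y : Int), Dom_coverageAtYset data Y → Spec_coverageAtYset data Y (coverageAtYset data Y)

-- ===== LEMMAS AND PROOFS =====

-- the x's of the interval p (a closed interval [lo, hi], as both programs enumerate it)
def pvRng (p : Int × Int) : List Int := PySem.List.pyRange p.1 (p.2 + 1) 1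

-- row-Y interval of sensor m, if row Y meets its area
def pvIv (Y : Int) (m : Int × Int × Int × Int) : Option (Int × Int) :=
  let r := |m.1 - m.2.2.1| + |m.2.1 - m.2.2.2| - |Y - m.2.1|
  if 0 ≤ r then some (m.1 - r, m.1 + r) else none

-- one sensor step of A's loop (over its interval) and of B's loop (over its interval + prefix)
def pvAStep (cov : List Int) (p : Int × Int) : List Int :=
  (pvRng p).foldl (fun cov x => PySem.Set.add cov x) cov

def pvBStep (st : List Int × List (Int × Int)) (p : Int × Int) : List Int × List (Int × Int) :=
  let segs := st.2.foldl (fun segs ab => segs.flatMap (fun s => pvSub s ab.1 ab.2)) [p]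
  (st.1 ++ segs.flatMap pvRng, st.2 ++ [p])

def pvPred (ab : Int × Int) (x : Int) : Bool := decide (x < ab.1) || decide (ab.2 < x)

lemma pvRng_nil {c d : Int} (h : d < c) : pvRng (c, d) = [] := by
  simp only [pvRng, PySem.List.pyRange_one]
  have : (d + 1 - c).toNat = 0 := by omega
  simp [this]

lemma pvRng_cons {c d : Int} (h : c ≤ d) : pvRng (c, d) = c :: pvRng (c + 1, d) := by
  simpa [pvRng] using PySem.List.pyRange_one_cons (a := c) (b := d + 1) (by omega)

lemma mem_pvRng {p : Int × Int} {x : Int} : x ∈ pvRng p ↔ p.1 ≤ x ∧ x ≤ p.2 := by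
  rw [pvRng, PySem.List.mem_pyRange_one]; omega

lemma nodup_pvRng (p : Int × Int) : (pvRng p).Nodup := PySem.List.nodup_pyRange_one _ _

-- core: subtracting [a,b] from a segment keeps exactly the x's outside [a,b], in order
lemma pvSub_flat (a b : Int) (hab : a ≤ b) :
    ∀ (n : Nat) (c d : Int), (d + 1 - c).toNat = n →
      (pvSub (c, d) a b).flatMap pvRng = (pvRng (c, d)).filter (pvPred (a, b)) := by
  intro n
  induction n with
  | zero =>
    intro c d hn
    have hdc : d < c := by omega
    rw [pvRng_nil hdc]
    simp only [pvSub, List.filter_nil]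
    split_ifs with h2 h3 h3 <;>
      simp_all [List.flatMap_cons, pvRng_nil (show (min d (a-1)) < c by omega),
        pvRng_nil (show d < max c (b+1) by omega)]
  | succ k ih =>
    intro c d hn
    have hcd : c ≤ d := by omega
    have ihc := ih (c + 1) d (by omega)
    rw [pvRng_cons hcd]
    by_cases hca : c < a
    · -- c kept: it lies left of [a,b]
      rw [List.filter_cons_of_pos (by simp only [pvPred]; simp; omega)]
      simp only [pvSub, if_pos hca, List.flatMap_append, List.flatMap_cons, List.flatMap_nil,
        List.append_nil] at ihc ⊢
      have hmin : c ≤ min d (a - 1) := by omega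
      rw [pvRng_cons hmin, List.cons_append,
        show max c (b + 1) = max (c + 1) (b + 1) by omega]
      by_cases hca1 : c + 1 < a
      · rw [if_pos hca1] at ihc
        simp only [List.flatMap_cons, List.flatMap_nil, List.append_nil] at ihc
        rw [ihc]
      · rw [if_neg hca1] at ihc
        simp only [List.flatMap_nil, List.nil_append] at ihc
        rw [pvRng_nil (show min d (a-1) < c + 1 by omega), List.nil_append, ihc]
    · by_cases hcb : c ≤ b
      · -- c swallowed by [a,b]
        rw [List.filter_cons_of_neg (by simp only [pvPred]; simp; omega)]
        simp only [pvSub, if_neg hca, if_neg (show ¬ c + 1 < a by omega), List.nil_append] at ihc ⊢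
        rw [show max c (b + 1) = max (c + 1) (b + 1) by omega]
        exact ihc
      · -- c kept: it lies right of [a,b]
        have hbd : b < d := by omega
        rw [List.filter_cons_of_pos (by simp only [pvPred]; simp; omega)]
        simp only [pvSub, if_neg hca, if_neg (show ¬ c + 1 < a by omega), if_pos hbd,
          List.nil_append, List.flatMap_cons, List.flatMap_nil, List.append_nil] at ihc ⊢
        rw [show max c (b + 1) = c by omega]
        rw [show max (c + 1) (b + 1) = c + 1 by omega] at ihc
        rw [pvRng_cons (show c ≤ d by omega)]
        exact congrArg (List.cons c) ihc

lemma pvSubStep_flat (a b : Int) (hab : a ≤ b) (segs : List (Int × Int)) :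
    (segs.flatMap (fun s => pvSub s a b)).flatMap pvRng
      = (segs.flatMap pvRng).filter (pvPred (a, b)) := by
  induction segs with
  | nil => rfl
  | cons s rest ih =>
    simp only [List.flatMap_cons, List.flatMap_append, List.filter_append, ih]
    congr 1
    exact pvSub_flat a b hab _ s.1 s.2 rfl

lemma pvSegs_flat : ∀ (prev : List (Int × Int)) (segs : List (Int × Int)),
    (∀ ab ∈ prev, ab.1 ≤ ab.2) →
    (prev.foldl (fun segs ab => segs.flatMap (fun s => pvSub s ab.1 ab.2)) segs).flatMap pvRng
      = prev.foldl (fun l ab => l.filter (pvPred ab)) (segs.flatMap pvRng) := by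
  intro prev
  induction prev with
  | nil => intro segs _; rfl
  | cons ab rest ih =>
    intro segs h
    simp only [List.foldl_cons]
    rw [ih _ (fun p hp => h p (List.mem_cons_of_mem _ hp)),
      pvSubStep_flat ab.1 ab.2 (h ab List.mem_cons_self) segs]

lemma pvFoldl_filter_all : ∀ (prev : List (Int × Int)) (l : List Int),
    prev.foldl (fun l ab => l.filter (pvPred ab)) l
      = l.filter (fun x => prev.all (fun ab => pvPred ab x)) := by
  intro prev
  induction prev with
  | nil => intro l; simp
  | cons ab rest ih =>
    intro l
    simp only [List.foldl_cons, ih, List.filter_filter]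
    apply List.filter_congr
    intro x _
    simp [Bool.and_comm]

-- main loop invariant: A's set-so-far is exactly B's output list, and it holds the x's
-- covered by the already-processed intervals
lemma pvLoop : ∀ (rest prev : List (Int × Int)) (cov : List Int),
    (∀ p ∈ rest, p.1 ≤ p.2) → (∀ p ∈ prev, p.1 ≤ p.2) → cov.Nodup →
    (∀ x : Int, x ∈ cov ↔ ∃ p ∈ prev, p.1 ≤ x ∧ x ≤ p.2) →
    rest.foldl pvAStep cov = (rest.foldl pvBStep (cov, prev)).1 := by
  intro rest
  induction rest with
  | nil => intro prev cov _ _ _ _; rfl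
  | cons p rest ih =>
    intro prev cov hrest hprev hnd hmem
    have hp : p.1 ≤ p.2 := hrest p List.mem_cons_self
    have hA : pvAStep cov p = cov ++ (pvRng p).filter (fun x => !(PySem.Set.contains cov x)) := by
      have h1 : pvAStep cov p = PySem.Set.update cov (pvRng p) := rfl
      rw [h1, PySem.Set.update_eq_append_filter,
        PySem.Set.ofList_eq_self_of_nodup _ (nodup_pvRng p)]
    have hfilter : (pvRng p).filter (fun x => !(PySem.Set.contains cov x))
        = (pvRng p).filter (fun x => prev.all (fun ab => pvPred ab x)) := by
      apply List.filter_congr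
      intro x _
      by_cases hx : x ∈ cov
      · obtain ⟨q, hq, hq1, hq2⟩ := (hmem x).1 hx
        have h1 : PySem.Set.contains cov x = true := (PySem.Set.contains_iff cov x).2 hx
        have h2 : prev.all (fun ab => pvPred ab x) = false := by
          rw [List.all_eq_false]
          refine ⟨q, hq, ?_⟩
          simp only [pvPred, Bool.or_eq_true, decide_eq_true_eq]
          omega
        rw [h1, h2]; rfl
      · have h1 : PySem.Set.contains cov x = false := by
          rw [Bool.eq_false_iff]
          intro hc
          exact hx ((PySem.Set.contains_iff cov x).1 hc)
        have h2 : prev.all (fun ab => pvPred ab x) = true := by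
          rw [List.all_eq_true]
          intro q hq
          have hno : ¬ (q.1 ≤ x ∧ x ≤ q.2) := fun hc => hx ((hmem x).2 ⟨q, hq, hc⟩)
          simp only [pvPred, Bool.or_eq_true, decide_eq_true_eq]
          omega
        rw [h1, h2]; rfl
    have hB1 : (pvBStep (cov, prev) p).1
        = cov ++ (pvRng p).filter (fun x => prev.all (fun ab => pvPred ab x)) := by
      show cov ++ _ = _
      rw [pvSegs_flat prev [p] hprev, List.flatMap_cons, List.flatMap_nil, List.append_nil,
        pvFoldl_filter_all]
    have hstep : pvBStep (cov, prev) p = (pvAStep cov p, prev ++ [p]) :=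
      Prod.ext_iff.2 ⟨by rw [hB1, hA, hfilter], rfl⟩
    simp only [List.foldl_cons, hstep]
    refine ih (prev ++ [p]) (pvAStep cov p)
      (fun q hq => hrest q (List.mem_cons_of_mem _ hq)) ?_ ?_ ?_
    · intro q hq
      rcases List.mem_append.1 hq with h | h
      · exact hprev q h
      · simp only [List.mem_singleton] at h; subst h; exact hp
    · rw [hA]
      refine List.Nodup.append hnd ((nodup_pvRng p).filter _) ?_
      intro x hx hx2
      have h1 := List.of_mem_filter hx2
      rw [(PySem.Set.contains_iff cov x).2 hx] at h1
      simp at h1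
    · intro x
      rw [hA, List.mem_append, List.mem_filter, hmem x]
      constructor
      · rintro (⟨q, hq, h1⟩ | ⟨hr, _⟩)
        · exact ⟨q, List.mem_append_left _ hq, h1⟩
        · exact ⟨p, List.mem_append_right _ List.mem_cons_self, mem_pvRng.1 hr⟩
      · rintro ⟨q, hq, h1, h2⟩
        rcases List.mem_append.1 hq with h | h
        · exact Or.inl ⟨q, h, h1, h2⟩
        · simp only [List.mem_singleton] at h; subst h
          by_cases hc : x ∈ cov
          · exact Or.inl ((hmem x).1 hc)
          · refine Or.inr ⟨mem_pvRng.2 ⟨h1, h2⟩, ?_⟩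
            have hcf : PySem.Set.contains cov x = false := by
              rw [Bool.eq_false_iff]
              intro hcc
              exact hc ((PySem.Set.contains_iff cov x).1 hcc)
            rw [hcf]
            rfl

-- B's first pass produces exactly the filterMap of pvIv
lemma pvIvs_eq (Y : Int) : ∀ (data : List (Int × Int × Int × Int)) (acc : List (Int × Int)),
    data.foldl (fun acc m =>
      let r := |m.1 - m.2.2.1| + |m.2.1 - m.2.2.2| - |Y - m.2.1|
      if 0 ≤ r then acc ++ [(m.1 - r, m.1 + r)] else acc) acc
      = acc ++ data.filterMap (pvIv Y) := by
  intro data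
  induction data with
  | nil => intro acc; simp
  | cons m rest ih =>
    intro acc
    rw [List.foldl_cons, List.filterMap_cons]
    by_cases h : 0 ≤ |m.1 - m.2.2.1| + |m.2.1 - m.2.2.2| - |Y - m.2.1|
    · rw [show pvIv Y m = some (m.1 - (|m.1 - m.2.2.1| + |m.2.1 - m.2.2.2| - |Y - m.2.1|),
            m.1 + (|m.1 - m.2.2.1| + |m.2.1 - m.2.2.2| - |Y - m.2.1|)) from by
          simp only [pvIv]; rw [if_pos h]]
      simp only [if_pos h]
      rw [ih]
      simp [List.append_assoc]
    · rw [show pvIv Y m = none from by simp only [pvIv]; rw [if_neg h]]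
      simp only [if_neg h]
      rw [ih]

-- the step of A's loop, phrased through pvIv
def pvARaw (Y : Int) (cov : List Int) (m : Int × Int × Int × Int) : List Int :=
  match pvIv Y m with
  | some p => pvAStep cov p
  | none => cov

-- A's loop over data is the interval loop over the same filterMap
lemma pvA_eq (Y : Int) : ∀ (data : List (Int × Int × Int × Int)) (cov : List Int),
    data.foldl (fun coverage m =>
      let S : Int × Int := (m.1, m.2.1)
      let B : Int × Int := (m.2.2.1, m.2.2.2)
      let d := pvManhattan S B
      let dy := |Y - S.2|
      if dy ≤ d then
        let xmin := S.1 - (d - dy)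
        let xmax := S.1 + (d - dy)
        (PySem.List.pyRange xmin (xmax + 1) 1).foldl (fun cov x => PySem.Set.add cov x) coverage
      else coverage) cov
      = (data.filterMap (pvIv Y)).foldl pvAStep cov := by
  have hfun : (fun (coverage : List Int) (m : Int × Int × Int × Int) =>
      let S : Int × Int := (m.1, m.2.1)
      let B : Int × Int := (m.2.2.1, m.2.2.2)
      let d := pvManhattan S B
      let dy := |Y - S.2|
      if dy ≤ d then
        let xmin := S.1 - (d - dy)
        let xmax := S.1 + (d - dy)
        (PySem.List.pyRange xmin (xmax + 1) 1).foldl (fun cov x => PySem.Set.add cov x) coverage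
      else coverage) = pvARaw Y := by
    funext coverage m
    simp only [pvARaw, pvIv, pvManhattan, pvAStep, pvRng]
    split_ifs with h1 h2 h2
    · rfl
    · exact absurd (by omega : (0:Int) ≤ |m.1 - m.2.2.1| + |m.2.1 - m.2.2.2| - |Y - m.2.1|) h2
    · exact absurd (by omega : |Y - m.2.1| ≤ |m.1 - m.2.2.1| + |m.2.1 - m.2.2.2|) h1
    · rfl
  intro data
  induction data with
  | nil => intro cov; rfl
  | cons m rest ih =>
    intro cov
    rw [List.foldl_cons, List.filterMap_cons, ih]
    have happ : (let S : Int × Int := (m.1, m.2.1)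
      let B : Int × Int := (m.2.2.1, m.2.2.2)
      let d := pvManhattan S B
      let dy := |Y - S.2|
      if dy ≤ d then
        let xmin := S.1 - (d - dy)
        let xmax := S.1 + (d - dy)
        (PySem.List.pyRange xmin (xmax + 1) 1).foldl (fun cov x => PySem.Set.add cov x) cov
      else cov) = pvARaw Y cov m := congrFun (congrFun hfun cov) m
    rw [happ]
    simp only [pvARaw]
    cases hiv : pvIv Y m with
    | none => rfl
    | some p => rw [List.foldl_cons]

-- every interval pvIv yields is nonempty (lo ≤ hi)
lemma pvIv_le (Y : Int) {data : List (Int × Int × Int × Int)} {p : Int × Int}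
    (h : p ∈ data.filterMap (pvIv Y)) : p.1 ≤ p.2 := by
  rcases List.mem_filterMap.1 h with ⟨m, _, hm⟩
  simp only [pvIv] at hm
  split_ifs at hm with h0
  cases hm
  omega

-- A's result is duplicate-free (it is built with Set.add from the empty set)
lemma pvA_nodup : ∀ (ivs : List (Int × Int)) (cov : List Int), cov.Nodup →
    (ivs.foldl pvAStep cov).Nodup := by
  intro ivs
  induction ivs with
  | nil => intro cov h; exact h
  | cons p rest ih =>
    intro cov h
    refine ih _ ?_
    have h1 : pvAStep cov p = PySem.Set.update cov (pvRng p) := rfl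
    rw [h1]
    exact PySem.Set.nodup_update cov (pvRng p) h

-- ===== VERDICT (by name: the statement is the Claim_ definition above) =====
theorem coverageAtYset_spec : Claim_equal_coverageAtYset := by
  intro data Y _
  unfold Spec_coverageAtYset coverageAtYset coverageAtYset_alt
  rw [pvA_eq Y data PySem.Set.empty, pvIvs_eq Y data []]
  simp only [List.nil_append]
  have hloop := pvLoop (data.filterMap (pvIv Y)) [] []
    (fun p hp => pvIv_le Y hp) (by intro p hp; cases hp) List.nodup_nil
    (by intro x
        constructor
        · intro h; cases h
        · rintro ⟨p, hp, -⟩; cases hp)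
  have hnd := pvA_nodup (data.filterMap (pvIv Y)) [] List.nodup_nil
  show List.foldl pvAStep (PySem.Set.empty) (data.filterMap (pvIv Y))
      = PySem.Set.ofList ((List.foldl pvBStep ([], []) (data.filterMap (pvIv Y))).1)
  have hofl : PySem.Set.ofList ((List.foldl pvBStep ([], []) (data.filterMap (pvIv Y))).1)
      = (List.foldl pvBStep ([], []) (data.filterMap (pvIv Y))).1 :=
    PySem.Set.ofList_eq_self_of_nodup _ (hloop ▸ hnd)
  rw [hofl]
  exact hloop
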